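-- pv_equiv track=rewrite | github.com/HoanChan/ETV | src/datasets/transforms/transforms_utils.py | get_thead_item_idx
-- ===== SOURCE A (Python) =====
-- def get_thead_item_idx(token_list: list) -> list:
--     """
--     This function will return the index (start from 0) of cell, which is belong to table head.
--     :param token_list: [list]. the raw tokens from the json line file.
--     :return: list of index.
--     """
--     if '</thead>' not in token_list:
--         return []
--     count = 0
--     while token_list[count] != '</thead>':
--         count += 1
--     thead_tokens = token_list[:count+1]
--     cell_nums_in_thead = thead_tokens.count('</td>')
--     return [i for i in range(cell_nums_in_thead)]
-- ===== SOURCE B (Python) =====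
-- def get_thead_item_idx(token_list: list) -> list:
--     """Single early-terminating pass: count '</td>' until the first '</thead>'."""
--     count = 0
--     for token in token_list:
--         if token == '</thead>':
--             return list(range(count))
--         if token == '</td>':
--             count += 1
--     return []
-- ===== Notes on version B (the rewrite author's own statement) =====
-- stated objective: simpler
-- what changed: Replaces A's membership scan + while-locate + slice + .count + comprehension (four passes) with one early-terminating loop carrying a single counter.
import Mathlib
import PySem

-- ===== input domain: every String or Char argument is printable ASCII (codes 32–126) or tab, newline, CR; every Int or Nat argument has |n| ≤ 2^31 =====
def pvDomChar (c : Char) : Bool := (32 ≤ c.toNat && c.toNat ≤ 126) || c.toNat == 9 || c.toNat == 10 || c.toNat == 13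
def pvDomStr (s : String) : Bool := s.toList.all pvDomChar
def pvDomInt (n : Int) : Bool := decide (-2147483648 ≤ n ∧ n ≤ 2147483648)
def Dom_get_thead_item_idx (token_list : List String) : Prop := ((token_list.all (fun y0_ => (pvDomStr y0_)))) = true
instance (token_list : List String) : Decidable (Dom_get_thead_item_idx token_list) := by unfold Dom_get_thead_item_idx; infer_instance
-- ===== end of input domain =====

-- B replaces A's four separate passes (membership scan, while-locate, slice, count) with one
-- early-terminating loop over the tokens carrying a single counter; objective: simpler.

-- ===== PORT A =====
-- the while loop 'while token_list[count] != "</thead>": count += 1' — under the membership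
-- guard it never runs off the end, so it is the structural recursion below
def pvFindHead : List String → Nat
  | [] => 0
  | t :: ts => if t ≠ "</thead>" then pvFindHead ts + 1 else 0

def get_thead_item_idx (token_list : List String) : List Int :=
  if "</thead>" ∉ token_list then []
  else
    let count : Nat := pvFindHead token_list
    let thead_tokens := PySem.List.slice token_list none (some ((count : Int) + 1))
    let cell_nums_in_thead : Int := (thead_tokens.count "</td>" : Int)
    PySem.List.pyRange 0 cell_nums_in_thead 1

-- ===== PORT B =====
def pvLoopB : List String → Int → List Int
  | [], _ => []
  | t :: ts, count =>
    if t = "</thead>" then PySem.List.pyRange 0 count 1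
    else if t = "</td>" then pvLoopB ts (count + 1)
    else pvLoopB ts count

def get_thead_item_idx_alt (token_list : List String) : List Int :=
  pvLoopB token_list 0

-- ===== PRECONDITION & SPEC =====
def Spec_get_thead_item_idx (token_list : List String) (out : List Int) : Prop := out = get_thead_item_idx_alt token_list
instance (token_list : List String) (out : List Int) : Decidable (Spec_get_thead_item_idx token_list out) := by unfold Spec_get_thead_item_idx; infer_instance

-- ===== CLAIM (what is proved, stated in full; the proofs are below) =====
def Claim_equal_get_thead_item_idx : Prop := ∀ (token_list : List String), Dom_get_thead_item_idx token_list → Spec_get_thead_item_idx token_list (get_thead_item_idx token_list)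

-- ===== LEMMAS AND PROOFS =====

-- B's loop, characterised by A's quantities: if '</thead>' occurs, the result is
-- range of (count so far + number of '</td>' up to and including the first '</thead>'), else [].
theorem pvLoopB_spec (ts : List String) : ∀ (c : Int), pvLoopB ts c =
    if "</thead>" ∈ ts then
      PySem.List.pyRange 0 (c + ((ts.take (pvFindHead ts + 1)).count "</td>" : Int)) 1
    else [] := by
  induction ts with
  | nil => simp [pvLoopB]
  | cons t ts ih =>
    intro c
    by_cases hh : t = "</thead>"
    · subst hh
      simp [pvLoopB, pvFindHead]
    · by_cases hm : "</thead>" ∈ ts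
      · by_cases ht : t = "</td>"
        · subst ht
          simp [pvLoopB, ih, hm, pvFindHead, List.take_succ_cons]
          ring_nf
        · simp [pvLoopB, hh, ht, ih, hm, pvFindHead, List.take_succ_cons]
      · have : "</thead>" ∉ t :: ts := by simp [hm, Ne.symm, hh]
        by_cases ht : t = "</td>" <;> simp [pvLoopB, hh, ht, ih, hm, this]

-- ===== VERDICT (by name: the statement is the Claim_ definition above) =====
theorem get_thead_item_idx_spec : Claim_equal_get_thead_item_idx := by
  intro tl _
  unfold Spec_get_thead_item_idx get_thead_item_idx get_thead_item_idx_alt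
  rw [pvLoopB_spec]
  by_cases hm : "</thead>" ∈ tl
  · simp only [hm, if_pos, not_true_eq_false, if_false]
    have hslice : PySem.List.slice tl none (some ((pvFindHead tl : Int) + 1))
        = tl.take (pvFindHead tl + 1) := by
      rw [show ((pvFindHead tl : Int) + 1) = ((pvFindHead tl + 1 : Nat) : Int) by push_cast; ring,
        PySem.List.slice_to_natCast]
    simp [hslice]
  · simp [hm]
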